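-- pv_equiv track=rewrite | github.com/Isfireomat/Math_work | defs.py | otstup
-- ===== SOURCE A (Python) =====
-- import math
-- from copy import deepcopy
--
-- def otstup(masiv,size_sum_masiv):
--     masiv=deepcopy(masiv)
--     masiv_otstup=[0 for _ in range(math.ceil(len(masiv[0]) / size_sum_masiv))]
--     for x in range(len(masiv)):
--         masiv[x] = [masiv[x][i:i + size_sum_masiv] for i in range(0, len(masiv[x]), size_sum_masiv)]
--     sumator=0
--     for x in range(len(masiv[0])):
--         if sum(masiv[0][x])==0:
--             sumator=0
--             for y in range(len(masiv)):
--                 if sum(masiv[y][x])!=0: break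
--                 sumator-=1
--         else:
--             sumator=0
--             for y in range(len(masiv)):
--                 if sum(masiv[y][x])==0: break
--                 sumator+=1
--         masiv_otstup[x]=sumator
--     return masiv_otstup
-- ===== SOURCE B (Python) =====
-- def otstup(masiv, size_sum_masiv):
--     s = size_sum_masiv
--     n = -(-len(masiv[0]) // s)  # ceil(len/s); <= 0 when s < 0 or the first row is empty
--     if n <= 0:
--         return []
--
--     def zrow(row):
--         # zeroness of each column-block of this row
--         return [sum(row[x * s:x * s + s]) == 0 for x in range(n)]
--
--     top = zrow(masiv[0])
--     # per-column state: (count so far, still in the leading run)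
--     state = [(-1, True) if t else (1, True) for t in top]
--     for row in masiv[1:]:
--         state = [((c + (-1 if t else 1), True) if (a and z == t) else (c, False))
--                  for (c, a), t, z in zip(state, top, zrow(row))]
--     return [c for c, _ in state]
-- ===== Notes on version B (the rewrite author's own statement) =====
-- stated objective: alternative
-- what changed: A deep-copies the matrix, materializes a list-of-blocks matrix and then scans each column top-down with a break-loop restarted per column; B never builds the block matrix: it makes one top-to-bottom pass over the rows, computing each row's block zeroness on the fly and maintaining a per-column (count, active) state that freezes at the first mismatch with row 0.
-- outside the precondition, e.g. on otstup([[1, 1], [0, 0], [1]], 1): A returns [1, 1], B returns [1, 1]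
import Mathlib
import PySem

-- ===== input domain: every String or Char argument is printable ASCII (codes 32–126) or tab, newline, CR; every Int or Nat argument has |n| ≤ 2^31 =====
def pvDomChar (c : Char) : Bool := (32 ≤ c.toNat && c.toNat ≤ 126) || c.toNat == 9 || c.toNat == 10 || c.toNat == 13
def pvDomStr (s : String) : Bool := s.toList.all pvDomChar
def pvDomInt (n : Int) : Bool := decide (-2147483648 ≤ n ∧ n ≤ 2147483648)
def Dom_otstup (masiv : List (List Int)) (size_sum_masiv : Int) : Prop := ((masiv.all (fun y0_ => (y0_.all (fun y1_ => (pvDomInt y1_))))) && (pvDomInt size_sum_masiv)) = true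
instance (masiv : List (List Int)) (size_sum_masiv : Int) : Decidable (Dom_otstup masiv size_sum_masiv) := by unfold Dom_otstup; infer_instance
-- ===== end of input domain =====

-- B replaces A's column-major scan with a materialized block matrix by a single top-to-bottom row pass
-- maintaining per-column (count, active) state; same asymptotic cost (objective: alternative decomposition).

-- ===== PORT A =====
-- A's inner `for y` loop in the `sum(...)==0` branch: walk rows, -1 per leading zero block, break otherwise.
def otstupNeg (rows : List (List (List Int))) (x : Nat) (acc : Int) : Int :=
  match rows with
  | [] => acc
  | r :: rest => if (r.getD x []).sum ≠ 0 then acc else otstupNeg rest x (acc - 1)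

-- A's inner `for y` loop in the nonzero branch: +1 per leading nonzero block, break on a zero block.
def otstupPos (rows : List (List (List Int))) (x : Nat) (acc : Int) : Int :=
  match rows with
  | [] => acc
  | r :: rest => if (r.getD x []).sum = 0 then acc else otstupPos rest x (acc + 1)

-- masiv[0] is ported as headD [] and masiv[y][x] as getD (Pre_ guarantees both accesses are in range);
-- math.ceil(len/size) on ints is exactly -((-len) // size).
def otstup (masiv : List (List Int)) (size_sum_masiv : Int) : List Int :=
  let n : Int := -(PySem.Int.floordiv (-(((masiv.headD []).length : Int))) size_sum_masiv)
  let masiv_otstup : List Int := List.replicate n.toNat 0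
  let blocks : List (List (List Int)) :=
    masiv.map (fun r =>
      (PySem.List.pyRange 0 (r.length : Int) size_sum_masiv).map
        (fun i => PySem.List.slice r (some i) (some (i + size_sum_masiv))))
  (List.range (blocks.headD []).length).foldl
    (fun acc x =>
      acc.set x (if ((blocks.headD []).getD x []).sum = 0 then otstupNeg blocks x 0
                 else otstupPos blocks x 0))
    masiv_otstup

-- ===== PORT B =====
-- zeroness of each of the n column-blocks of one row (Source B's zrow)
def otstupZRow (s : Int) (n : Nat) (row : List Int) : List Bool :=
  (List.range n).map (fun (x : Nat) =>
    decide ((PySem.List.slice row (some ((x : Int) * s)) (some ((x : Int) * s + s))).sum = 0))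

-- one row step of Source B: update per-column (count, active) state from the row's block zeroness
def otstupStep (top : List Bool) (state : List (Int × Bool)) (z : List Bool) : List (Int × Bool) :=
  (state.zip (top.zip z)).map (fun p =>
    if p.1.2 && (p.2.2 == p.2.1) then (p.1.1 + (if p.2.1 then -1 else 1), true)
    else (p.1.1, false))

def otstup_alt (masiv : List (List Int)) (size_sum_masiv : Int) : List Int :=
  let n : Int := -(PySem.Int.floordiv (-(((masiv.headD []).length : Int))) size_sum_masiv)
  if n ≤ 0 then []
  else
    let top := otstupZRow size_sum_masiv n.toNat (masiv.headD [])
    let init := top.map (fun t => if t then ((-1 : Int), true) else (1, true))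
    (masiv.tail.foldl
      (fun st row => otstupStep top st (otstupZRow size_sum_masiv n.toNat row)) init).map (·.1)

-- ===== PRECONDITION & SPEC =====
-- Pre_ excludes: empty masiv (A raises IndexError), size 0 (A raises ZeroDivisionError), and ragged inputs
-- where some row splits into fewer column-blocks than row 0 — on those A raises IndexError whenever such a
-- missing block is reached (and on the few where A's break happens first, B returns the same value anyway).
def Pre_otstup (masiv : List (List Int)) (size_sum_masiv : Int) : Prop :=
  masiv ≠ [] ∧ size_sum_masiv ≠ 0 ∧
  (0 < size_sum_masiv → ∀ row ∈ masiv,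
    ((masiv.headD []).length + size_sum_masiv.toNat - 1) / size_sum_masiv.toNat
      ≤ (row.length + size_sum_masiv.toNat - 1) / size_sum_masiv.toNat)
instance (masiv : List (List Int)) (size_sum_masiv : Int) : Decidable (Pre_otstup masiv size_sum_masiv) := by
  unfold Pre_otstup; infer_instance

def pvWitness_otstup : List (List Int) × Int := ([[1, 0, 0, 2], [1, 0, 1, 0], [0, 0, 1, 1]], 2)

def Spec_otstup (masiv : List (List Int)) (size_sum_masiv : Int) (out : List Int) : Prop := out = otstup_alt masiv size_sum_masiv
instance (masiv : List (List Int)) (size_sum_masiv : Int) (out : List Int) : Decidable (Spec_otstup masiv size_sum_masiv out) := by unfold Spec_otstup; infer_instance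

-- ===== CLAIM (what is proved, stated in full; the proofs are below) =====
def Claim_equal_otstup : Prop := ∀ (masiv : List (List Int)) (size_sum_masiv : Int), Dom_otstup masiv size_sum_masiv → Pre_otstup masiv size_sum_masiv → Spec_otstup masiv size_sum_masiv (otstup masiv size_sum_masiv)

-- ===== LEMMAS AND PROOFS =====

-- setting into the empty list is a no-op, so A's whole write loop is a no-op there
lemma pv_foldl_set_nil (g : Nat → Int) (l : List Nat) :
    l.foldl (fun acc x => acc.set x (g x)) [] = [] := by
  induction l with
  | nil => rfl
  | cons a l ih => simpa using ih

-- A's write loop over range nb into a buffer of length ≥ nb is the map of the per-index value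
lemma pv_foldl_set_range (g : Nat → Int) :
    ∀ (nb : Nat) (xs : List Int), nb ≤ xs.length →
      (List.range nb).foldl (fun acc x => acc.set x (g x)) xs
        = (List.range nb).map g ++ xs.drop nb := by
  intro nb
  induction nb with
  | zero => intro xs _; simp
  | succ nb ih =>
    intro xs h
    rw [List.range_succ, List.foldl_append]
    simp only [List.foldl_cons, List.foldl_nil]
    rw [ih xs (by omega)]
    rw [List.set_append_right _ _ (by simp)]
    rw [List.drop_eq_getElem_cons (show nb < xs.length by omega)]
    simp
    rw [List.drop_eq_getElem_cons (show nb < xs.length by omega)]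
    rfl

-- takeWhile only looks at members
lemma pv_takeWhile_congr {α : Type} (p q : α → Bool) :
    ∀ (l : List α), (∀ a ∈ l, p a = q a) → l.takeWhile p = l.takeWhile q := by
  intro l
  induction l with
  | nil => intro _; rfl
  | cons a l ih =>
    intro h
    simp only [List.takeWhile_cons, h a (by simp)]
    cases q a <;> simp [ih fun b hb => h b (by simp [hb])]

-- A's negative inner loop counts the leading zero-blocks
lemma pv_otstupNeg_eq (x : Nat) :
    ∀ (rows : List (List (List Int))) (acc : Int),
      otstupNeg rows x acc
        = acc - ((rows.takeWhile (fun r => (r.getD x []).sum == 0)).length : Int) := by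
  intro rows
  induction rows with
  | nil => intro acc; simp [otstupNeg]
  | cons r rest ih =>
    intro acc
    rw [List.takeWhile_cons]
    by_cases h : (r.getD x []).sum = 0
    · rw [if_pos (by simpa using h),
        show otstupNeg (r :: rest) x acc = otstupNeg rest x (acc - 1) from if_neg (not_not_intro h), ih]
      simp only [List.length_cons]
      push_cast; ring
    · rw [if_neg (by simpa using h), show otstupNeg (r :: rest) x acc = acc from if_pos h]
      simp

-- A's positive inner loop counts the leading nonzero-blocks
lemma pv_otstupPos_eq (x : Nat) :
    ∀ (rows : List (List (List Int))) (acc : Int),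
      otstupPos rows x acc
        = acc + ((rows.takeWhile (fun r => !((r.getD x []).sum == 0))).length : Int) := by
  intro rows
  induction rows with
  | nil => intro acc; simp [otstupPos]
  | cons r rest ih =>
    intro acc
    rw [List.takeWhile_cons]
    by_cases h : (r.getD x []).sum = 0
    · rw [if_neg (by simpa using h), show otstupPos (r :: rest) x acc = acc from if_pos h]
      simp
    · rw [if_pos (by simpa using h),
        show otstupPos (r :: rest) x acc = otstupPos rest x (acc + 1) from if_neg h, ih]
      simp only [List.length_cons]
      push_cast; ring

-- the per-column scalar step B performs
def pvSStep (t : Bool) (p : Int × Bool) (z : Bool) : Int × Bool :=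
  if p.2 && (z == t) then (p.1 + (if t then -1 else 1), true) else (p.1, false)

lemma pv_sfold_frozen (t : Bool) : ∀ (zs : List Bool) (c : Int),
    zs.foldl (pvSStep t) (c, false) = (c, false) := by
  intro zs
  induction zs with
  | nil => intro c; rfl
  | cons z zs ih => intro c; simp [pvSStep, ih]

lemma pv_sfold_eq (t : Bool) : ∀ (zs : List Bool) (c : Int),
    (zs.foldl (pvSStep t) (c, true)).1
      = c + (if t then -1 else 1) * ((zs.takeWhile (· == t)).length : Int) := by
  intro zs
  induction zs with
  | nil => intro c; simp
  | cons z zs ih =>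
    intro c
    by_cases h : z = t
    · subst h
      simp [pvSStep, ih]
      split_ifs <;> ring
    · have hz : (z == t) = false := by simp [h]
      simp [pvSStep, hz, pv_sfold_frozen]

-- B's row pass, viewed column-wise: pointwise scalar folds
lemma pv_fold_pointwise (s : Int) (nn : Nat) (topf : Nat → Bool) :
    ∀ (rows : List (List Int)) (F : Nat → Int × Bool),
      rows.foldl (fun st row => otstupStep ((List.range nn).map topf) st (otstupZRow s nn row))
          ((List.range nn).map F)
        = (List.range nn).map (fun (x : Nat) =>
            (rows.map (fun row =>
              decide ((PySem.List.slice row (some ((x : Int) * s)) (some ((x : Int) * s + s))).sum = 0))).foldl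
              (pvSStep (topf x)) (F x)) := by
  intro rows
  induction rows with
  | nil => intro F; simp
  | cons row rows ih =>
    intro F
    simp only [List.foldl_cons]
    have hstep : otstupStep ((List.range nn).map topf) ((List.range nn).map F)
        (otstupZRow s nn row)
        = (List.range nn).map (fun (x : Nat) => pvSStep (topf x) (F x)
            (decide ((PySem.List.slice row (some ((x : Int) * s)) (some ((x : Int) * s + s))).sum = 0))) := by
      simp only [otstupStep, otstupZRow, List.zip_map', List.map_map]
      rfl
    rw [hstep, ih]
    simp

-- both programs return [] when the computed block count n is nonpositive
lemma pv_both_empty (masiv : List (List Int)) (s : Int)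
    (hn : -(PySem.Int.floordiv (-(((masiv.headD []).length : Int))) s) ≤ 0) :
    otstup masiv s = otstup_alt masiv s := by
  simp only [otstup, otstup_alt]
  rw [if_pos hn]
  have h0 : (-(PySem.Int.floordiv (-(((masiv.headD []).length : Int))) s)).toNat = 0 := by omega
  rw [h0]
  exact pv_foldl_set_nil _ _

-- for a negative step, floordiv (-len) s is nonnegative, so the block count is ≤ 0
lemma pv_q_nonneg (L : Nat) (s : Int) (hs : s < 0) :
    0 ≤ PySem.Int.floordiv (-(L : Int)) s := by
  have hq1 := PySem.Int.floordiv_mul_add_mod (-(L : Int)) s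
  have hq2 := PySem.Int.mod_neg_bounds (a := -(L : Int)) hs
  have hL : (0 : Int) ≤ (L : Int) := Int.natCast_nonneg _
  set q := PySem.Int.floordiv (-(L : Int)) s with hqdef
  by_contra hqneg
  rw [not_le] at hqneg
  have h5 : 0 ≤ (q + 1) * s :=
    Int.mul_nonneg_of_nonpos_of_nonpos (by omega) (by omega)
  rw [add_mul, one_mul] at h5
  linarith [hq2.1]

-- the ceiling count A computes equals the Nat-division form used in Pre_
lemma pv_ceil_eq (L : Nat) (s : Int) (hs : 0 < s) :
    -(PySem.Int.floordiv (-(L : Int)) s) = (((L + s.toNat - 1) / s.toNat : Nat) : Int) := by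
  have hsN : ((s.toNat : Int)) = s := Int.toNat_of_nonneg (by omega)
  set sN := s.toNat with hsNdef
  have hsN1 : 1 ≤ sN := by omega
  rw [PySem.Int.neg_floordiv_neg_eq_iff_of_pos hs]
  have hdm := Nat.div_add_mod (L + sN - 1) sN
  have hmlt : (L + sN - 1) % sN < sN := Nat.mod_lt _ (by omega)
  set nnN := (L + sN - 1) / sN with hnn
  set m := (L + sN - 1) % sN with hm
  have hcast : (nnN : Int) * sN + (m : Int) = (L : Int) + sN - 1 := by
    have h := congrArg (fun (k : Nat) => (k : Int)) hdm
    push_cast [Nat.cast_sub (show 1 ≤ L + sN by omega)] at h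
    linear_combination h
  constructor
  · rw [← hsN, sub_mul, one_mul]
    have hm0 : (0 : Int) ≤ (m : Int) := Int.natCast_nonneg _
    linarith
  · rw [← hsN]
    have hmlt' : (m : Int) < (sN : Int) := by exact_mod_cast hmlt
    linarith

-- the element count of pyRange 0 len s (s > 0) in Nat-division form
lemma pv_pyRange_blocks (r : List Int) (s : Int) (hs : 0 < s) :
    PySem.List.pyRange 0 (r.length : Int) s
      = (List.range ((r.length + s.toNat - 1) / s.toNat)).map (fun (k : Nat) => (k : Int) * s) := by
  rw [PySem.List.pyRange_of_pos _ _ hs]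
  congr 1
  · funext k; ring
  have hsN : ((s.toNat : Int)) = s := Int.toNat_of_nonneg (by omega)
  set sN := s.toNat with hsNdef
  have hsN1 : 1 ≤ sN := by omega
  by_cases hr : 0 < r.length
  · rw [if_pos (by exact_mod_cast hr)]
    have : ((r.length : Int) - 0 + s - 1) / s = (((r.length + sN - 1) / sN : Nat) : Int) := by
      rw [← hsN, Int.natCast_ediv]
      congr 1
      push_cast [Nat.cast_sub (show 1 ≤ r.length + sN by omega)]
      ring
    rw [this, Int.toNat_natCast]
  · rw [if_neg (by omega)]
    have hr0 : r.length = 0 := by omega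
    rw [hr0]
    rw [Nat.div_eq_of_lt (by omega)]

-- the main case: positive step, nonempty first row
lemma pv_main (r0 : List Int) (rest : List (List Int)) (s : Int) (hs : 0 < s)
    (hrag : ∀ row ∈ r0 :: rest,
      (r0.length + s.toNat - 1) / s.toNat ≤ (row.length + s.toNat - 1) / s.toNat)
    (hL0 : 0 < r0.length) :
    otstup (r0 :: rest) s = otstup_alt (r0 :: rest) s := by
  have hnn1 : 1 ≤ (r0.length + s.toNat - 1) / s.toNat := by
    rw [Nat.le_div_iff_mul_le (by omega)]
    omega
  simp only [otstup, otstup_alt, List.headD_cons, List.tail_cons, List.map_cons]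
  rw [pv_ceil_eq r0.length s hs]
  set nn := (r0.length + s.toNat - 1) / s.toNat with hnndef
  rw [Int.toNat_natCast]
  rw [if_neg (by omega)]
  rw [pv_pyRange_blocks r0 s hs]
  simp only [fun (r : List Int) => pv_pyRange_blocks r s hs]
  rw [← hnndef]
  simp only [List.map_map, Function.comp_def, List.length_map, List.length_range]
  rw [pv_foldl_set_range _ nn (List.replicate nn 0) (by simp)]
  simp only [List.drop_replicate, Nat.sub_self, List.replicate_zero, List.append_nil]
  rw [show otstupZRow s nn r0 = (List.range nn).map (fun (x : Nat) =>
      decide ((PySem.List.slice r0 (some ((x : Int) * s)) (some ((x : Int) * s + s))).sum = 0)) from rfl]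
  rw [List.map_map]
  rw [pv_fold_pointwise]
  rw [List.map_map]
  apply List.map_congr_left
  intro x hx
  rw [List.mem_range] at hx
  simp only [Function.comp_apply]
  have hbx : ∀ r : List Int, x < (r.length + s.toNat - 1) / s.toNat →
      (List.map (fun (k : Nat) => PySem.List.slice r (some ((k : Int) * s)) (some ((k : Int) * s + s)))
        (List.range ((r.length + s.toNat - 1) / s.toNat))).getD x []
        = PySem.List.slice r (some ((x : Int) * s)) (some ((x : Int) * s + s)) :=
    fun r hr => PySem.List.getD_map_range _ _ _ _ hr
  have hx0 : x < (r0.length + s.toNat - 1) / s.toNat := by omega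
  have hgetD0 : (List.map (fun (k : Nat) => PySem.List.slice r0 (some ((k : Int) * s)) (some ((k : Int) * s + s)))
        (List.range nn)).getD x []
        = PySem.List.slice r0 (some ((x : Int) * s)) (some ((x : Int) * s + s)) := by
    rw [hnndef]; exact hbx r0 hx0
  have hcongr : List.takeWhile
        ((fun r : List (List Int) => (r.getD x []).sum == 0) ∘
          (fun r => List.map (fun (k : Nat) => PySem.List.slice r (some ((k : Int) * s)) (some ((k : Int) * s + s)))
            (List.range ((r.length + s.toNat - 1) / s.toNat)))) rest
      = List.takeWhile (fun r =>
          decide ((PySem.List.slice r (some ((x : Int) * s)) (some ((x : Int) * s + s))).sum = 0)) rest := by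
    apply pv_takeWhile_congr
    intro r hr
    have hxr : x < (r.length + s.toNat - 1) / s.toNat :=
      lt_of_lt_of_le hx (hrag r (by simp [hr]))
    simp only [Function.comp_apply]
    rw [hbx r hxr, Bool.beq_eq_decide_eq]
  by_cases hz : (PySem.List.slice r0 (some ((x : Int) * s)) (some ((x : Int) * s + s))).sum = 0
  · rw [hgetD0, if_pos hz, pv_otstupNeg_eq]
    rw [List.takeWhile_cons, if_pos (by rw [hgetD0]; simpa using hz)]
    rw [List.takeWhile_map, hcongr]
    have hzt : (decide ((PySem.List.slice r0 (some ((x : Int) * s)) (some ((x : Int) * s + s))).sum = 0)) = true :=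
      decide_eq_true hz
    rw [hzt]
    simp only [reduceIte]
    rw [pv_sfold_eq]
    rw [List.takeWhile_map]
    simp only [Function.comp_def, beq_true]
    simp only [List.length_cons, List.length_map, reduceIte]
    push_cast
    ring
  · have hcongrN : List.takeWhile
        ((fun r : List (List Int) => !((r.getD x []).sum == 0)) ∘
          (fun r => List.map (fun (k : Nat) => PySem.List.slice r (some ((k : Int) * s)) (some ((k : Int) * s + s)))
            (List.range ((r.length + s.toNat - 1) / s.toNat)))) rest
      = List.takeWhile (fun r =>
          !(decide ((PySem.List.slice r (some ((x : Int) * s)) (some ((x : Int) * s + s))).sum = 0))) rest := by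
      apply pv_takeWhile_congr
      intro r hr
      have hxr : x < (r.length + s.toNat - 1) / s.toNat :=
        lt_of_lt_of_le hx (hrag r (by simp [hr]))
      simp only [Function.comp_apply]
      rw [hbx r hxr, Bool.beq_eq_decide_eq]
    rw [hgetD0, if_neg hz, pv_otstupPos_eq]
    rw [List.takeWhile_cons, if_pos (by rw [hgetD0]; simpa using hz)]
    rw [List.takeWhile_map, hcongrN]
    have hzf : (decide ((PySem.List.slice r0 (some ((x : Int) * s)) (some ((x : Int) * s + s))).sum = 0)) = false :=
      decide_eq_false hz
    rw [hzf]
    simp only [Bool.false_eq_true, reduceIte]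
    rw [pv_sfold_eq]
    rw [List.takeWhile_map]
    simp only [Function.comp_def, beq_false]
    simp only [List.length_cons, List.length_map, Bool.false_eq_true, reduceIte]
    push_cast
    ring

-- ===== VERDICT (by name: the statement is the Claim_ definition above) =====
theorem otstup_spec : Claim_equal_otstup := by
  intro masiv s _hDom hPre
  obtain ⟨hne, hs0, hrag⟩ := hPre
  unfold Spec_otstup
  by_cases hs : 0 < s
  case neg =>
    exact pv_both_empty masiv s (by have := pv_q_nonneg (masiv.headD []).length s (by omega); omega)
  case pos =>
    obtain ⟨r0, rest, rfl⟩ := List.exists_cons_of_ne_nil hne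
    by_cases hL0 : r0.length = 0
    · apply pv_both_empty
      simp only [List.headD_cons]
      rw [pv_ceil_eq r0.length s hs, hL0]
      rw [Nat.div_eq_of_lt (by omega)]
      rfl
    · exact pv_main r0 rest s hs (by simpa [List.headD_cons] using hrag hs) (by omega)
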